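-- pv_equiv track=rewrite | github.com/nguyenngochuy91/companyQuestions | google/candyCrush.py | setToZero
-- ===== SOURCE A (Python) =====
-- def setToZero(board,row,col):
--
--     coordinates = set()
--     # check row to collapse
--     for r in range(row):
--         count = 1
--         for c in range(col-1):
--             if board[r][c] == board[r][c+1] and board[r][c]!=0:
--
--                 count+=1
--             else:
--                 if count>=3: # we can crush from i back to i-count
--
--                     for i in range(count):
--                         coordinates.add((r,c-i))
--                 count = 1
--
--         # now we check if count >=3 still
--         if count>=3: # we can crush from i back to i-count
--
--             for i in range(count):
--                 coordinates.add((r,col-1-i))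
--
--     # check col to collapse
--     for c in range(col):
--         count = 1
--         for r in range(row-1):
--             if board[r][c] == board[r+1][c] and board[r][c]!=0:
--                 count+=1
--             else:
--                 if count>=3: # we can crush from i back to i-count
--
--                     for i in range(count):
--                         item = (r-i,c)
--                         coordinates.add(item)
--                 count = 1
--         # now we check if count >=3 still
--         if count>=3: # we can crush from i back to i-count
--
--             for i in range(count):
--                 item = (row-1-i,c)
--                 coordinates.add(item)
--     return coordinates
-- ===== SOURCE B (Python) =====
-- def setToZero(board, row, col):
--     coordinates = set()
--
--     def crushable(line, n):
--         # staged pass 1: suffix run-length table, built right-to-left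
--         run = []
--         nxt = 0
--         for i in range(n - 1, -1, -1):
--             cur = nxt + 1 if i + 1 < n and line(i) == line(i + 1) and line(i) != 0 else 1
--             run = [cur] + run
--             nxt = cur
--         # staged pass 2: jump run-by-run, emitting qualifying runs back-to-front
--         out = []
--         i = 0
--         while i < n:
--             k = run[i]
--             if k >= 3:
--                 out.extend(range(i + k - 1, i - 1, -1))
--             i += k
--         return out
--
--     for r in range(row):
--         for c in crushable(lambda c: board[r][c], col):
--             coordinates.add((r, c))
--     for c in range(col):
--         for t in crushable(lambda t: board[t][c], row):
--             coordinates.add((t, c))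
--     return coordinates
-- ===== Notes on version B (the rewrite author's own statement) =====
-- stated objective: alternative
-- what changed: Replaces A's online run-length counter with flush-on-mismatch and separate end-of-line flush by two staged passes per line: first build an explicit suffix run-length table right-to-left, then a second pass jumps over the table run-by-run emitting qualifying runs from one place.
import Mathlib
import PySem

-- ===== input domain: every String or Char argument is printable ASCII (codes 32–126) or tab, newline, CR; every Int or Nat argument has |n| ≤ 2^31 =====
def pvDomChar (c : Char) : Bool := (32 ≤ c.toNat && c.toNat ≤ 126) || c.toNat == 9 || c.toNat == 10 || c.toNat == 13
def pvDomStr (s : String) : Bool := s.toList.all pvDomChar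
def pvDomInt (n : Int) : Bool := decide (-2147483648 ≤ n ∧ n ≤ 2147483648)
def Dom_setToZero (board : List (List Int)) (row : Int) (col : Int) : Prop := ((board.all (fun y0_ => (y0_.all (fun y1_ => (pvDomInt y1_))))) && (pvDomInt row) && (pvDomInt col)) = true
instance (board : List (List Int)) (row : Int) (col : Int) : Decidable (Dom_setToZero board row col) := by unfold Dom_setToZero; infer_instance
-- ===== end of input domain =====

-- B replaces A's online counter-with-flushes scan by two staged passes per line: it first builds an
-- explicit suffix run-length table (right to left), then a second pass jumps run-by-run over that
-- table emitting qualifying runs (objective: alternative; same cost, different structure).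

-- board[r][c]; exact whenever the indices are in range (guaranteed by Pre_setToZero for every access either port makes)
def bget (board : List (List Int)) (r c : Int) : Int :=
  PySem.List.pyGetD (PySem.List.pyGetD board r []) c 0

-- ===== PORT A =====
def setToZero (board : List (List Int)) (row : Int) (col : Int) : List (Int × Int) :=
  let coordinates : PySem.Set (Int × Int) := PySem.Set.empty
  -- check row to collapse
  let coordinates := (PySem.List.pyRange 0 row 1).foldl (fun coordinates r =>
    let st := (PySem.List.pyRange 0 (col - 1) 1).foldl
      (fun (st : PySem.Set (Int × Int) × Int) c =>
        if bget board r c = bget board r (c + 1) ∧ bget board r c ≠ 0 then (st.1, st.2 + 1)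
        else ((if st.2 ≥ 3 then
                 (PySem.List.pyRange 0 st.2 1).foldl (fun cs i => PySem.Set.add cs (r, c - i)) st.1
               else st.1), 1))
      (coordinates, 1)
    -- now we check if count >= 3 still
    if st.2 ≥ 3 then
      (PySem.List.pyRange 0 st.2 1).foldl (fun cs i => PySem.Set.add cs (r, col - 1 - i)) st.1
    else st.1) coordinates
  -- check col to collapse
  (PySem.List.pyRange 0 col 1).foldl (fun coordinates c =>
    let st := (PySem.List.pyRange 0 (row - 1) 1).foldl
      (fun (st : PySem.Set (Int × Int) × Int) r =>
        if bget board r c = bget board (r + 1) c ∧ bget board r c ≠ 0 then (st.1, st.2 + 1)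
        else ((if st.2 ≥ 3 then
                 (PySem.List.pyRange 0 st.2 1).foldl (fun cs i => PySem.Set.add cs (r - i, c)) st.1
               else st.1), 1))
      (coordinates, 1)
    if st.2 ≥ 3 then
      (PySem.List.pyRange 0 st.2 1).foldl (fun cs i => PySem.Set.add cs (row - 1 - i, c)) st.1
    else st.1) coordinates

-- ===== PORT B =====
-- Source B, crushable, pass 1: the suffix run-length table `run` (built right to left, prepending)
def runLens (get : Int → Int) (n : Int) : List Int :=
  ((PySem.List.pyRange (n - 1) (-1) (-1)).foldl
    (fun (st : List Int × Int) i =>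
      let cur := if i + 1 < n ∧ get i = get (i + 1) ∧ get i ≠ 0 then st.2 + 1 else 1
      (cur :: st.1, cur))
    ([], 0)).1

-- Source B, crushable, pass 2: the while loop (i jumps by run[i]); the Nat fuel only bounds the
-- iteration count — each step advances i by run[i] ≥ 1, so n.toNat fuel is never exhausted
def emit (run : List Int) (n : Int) (i : Int) : Nat → List Int
  | 0 => []
  | fuel + 1 =>
    if i < n then
      let k := PySem.List.pyGetD run i 1
      (if k ≥ 3 then PySem.List.pyRange (i + k - 1) (i - 1) (-1) else []) ++ emit run n (i + k) fuel
    else []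

def crushable (get : Int → Int) (n : Int) : List Int :=
  emit (runLens get n) n 0 n.toNat

def setToZero_alt (board : List (List Int)) (row : Int) (col : Int) : List (Int × Int) :=
  let coordinates : PySem.Set (Int × Int) := PySem.Set.empty
  let coordinates := (PySem.List.pyRange 0 row 1).foldl
    (fun coordinates r =>
      (crushable (fun c => bget board r c) col).foldl
        (fun cs c => PySem.Set.add cs (r, c)) coordinates)
    coordinates
  (PySem.List.pyRange 0 col 1).foldl
    (fun coordinates c =>
      (crushable (fun t => bget board t c) row).foldl
        (fun cs t => PySem.Set.add cs (t, c)) coordinates)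
    coordinates

-- ===== PRECONDITION & SPEC =====
-- Exactly the inputs on which A returns: whenever a scan phase is active (row ≥ 1 ∧ col ≥ 2 for the
-- row phase, row ≥ 2 ∧ col ≥ 1 for the column phase) the first `row` rows must exist with length
-- ≥ col; otherwise A (and B, which reads the same cells) raises IndexError.
def Pre_setToZero (board : List (List Int)) (row : Int) (col : Int) : Prop :=
  ((1 ≤ row ∧ 2 ≤ col) ∨ (2 ≤ row ∧ 1 ≤ col)) →
    (row ≤ (board.length : Int) ∧ ∀ l ∈ board.take row.toNat, col ≤ (l.length : Int))
instance (board : List (List Int)) (row : Int) (col : Int) : Decidable (Pre_setToZero board row col) := by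
  unfold Pre_setToZero; infer_instance

def pvWitness_setToZero : List (List Int) × Int × Int := ([[1, 1, 1], [2, 0, 2], [1, 2, 2]], 3, 3)

def Spec_setToZero (board : List (List Int)) (row : Int) (col : Int) (out : List (Int × Int)) : Prop := out = setToZero_alt board row col
instance (board : List (List Int)) (row : Int) (col : Int) (out : List (Int × Int)) : Decidable (Spec_setToZero board row col out) := by unfold Spec_setToZero; infer_instance

-- ===== CLAIM (what is proved, stated in full; the proofs are below) =====
def Claim_equal_setToZero : Prop := ∀ (board : List (List Int)) (row : Int) (col : Int), Dom_setToZero board row col → Pre_setToZero board row col → Spec_setToZero board row col (setToZero board row col)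

-- ===== LEMMAS AND PROOFS =====

-- the run length starting at i, as a recursive function (the value Source B's table holds at index i)
def runN (n : Int) (get : Int → Int) (i : Int) : Int :=
  if h : i + 1 < n ∧ get i = get (i + 1) ∧ get i ≠ 0 then runN n get (i + 1) + 1 else 1
termination_by (n - i).toNat
decreasing_by omega

theorem runN_pos (n : Int) (get : Int → Int) (i : Int) : 1 ≤ runN n get i := by
  induction i using runN.induct n get with
  | case1 i h ih => rw [runN, dif_pos h]; omega
  | case2 i h => rw [runN, dif_neg h]

theorem runN_le (n : Int) (get : Int → Int) (i : Int) (h : i < n) : i + runN n get i ≤ n := by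
  induction i using runN.induct n get with
  | case1 i h' ih => rw [runN, dif_pos h']; have := ih h'.1; omega
  | case2 i h' => rw [runN, dif_neg h']; omega

theorem runN_val (n : Int) (get : Int → Int) (i : Int) :
    ∀ m, i ≤ m → m ≤ i + runN n get i - 1 → get m = get i := by
  induction i using runN.induct n get with
  | case1 i h ih =>
    intro m h1 h2
    rw [runN, dif_pos h] at h2
    rcases eq_or_lt_of_le h1 with he | hl
    · rw [← he]
    · have hm : get m = get (i + 1) := ih m (by omega) (by omega)
      rw [hm, ← h.2.1]
  | case2 i h =>
    intro m h1 h2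
    rw [runN, dif_neg h] at h2
    have hmi : m = i := by omega
    rw [hmi]

theorem runN_max (n : Int) (get : Int → Int) (i : Int) (h : i + runN n get i < n) :
    ¬ (get (i + runN n get i) = get i ∧ get i ≠ 0) := by
  induction i using runN.induct n get with
  | case1 i h' ih =>
    rw [runN, dif_pos h'] at h ⊢
    have h2 := ih (by omega)
    have e : i + (runN n get (i + 1) + 1) = (i + 1) + runN n get (i + 1) := by ring
    rw [e]
    rintro ⟨ha, hb⟩
    exact h2 ⟨ha.trans h'.2.1, by rw [← h'.2.1]; exact hb⟩
  | case2 i h' =>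
    rw [runN, dif_neg h'] at h ⊢
    rintro ⟨ha, hb⟩
    exact h' ⟨h, ha.symm, hb⟩

theorem runN_nonzero (n : Int) (get : Int → Int) (i : Int) (h : 2 ≤ runN n get i) : get i ≠ 0 := by
  by_cases hc : i + 1 < n ∧ get i = get (i + 1) ∧ get i ≠ 0
  · exact hc.2.2
  · rw [runN, dif_neg hc] at h; omega

-- A's state transition on one inner-loop iteration (pair position c), abstracted over the line accessor
def aStep (get : Int → Int) (put : Int → List (Int × Int) → List (Int × Int)) :
    (List (Int × Int) × Int) → Int → (List (Int × Int) × Int) :=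
  fun st c =>
    if get c = get (c + 1) ∧ get c ≠ 0 then (st.1, st.2 + 1)
    else ((if st.2 ≥ 3 then
             (PySem.List.pyRange 0 st.2 1).foldl (fun cs i => put (c - i) cs) st.1
           else st.1), 1)

-- A's processing of one line from pair position i onward, starting with count 1, including the final flush
def aLine (n : Int) (get : Int → Int) (put : Int → List (Int × Int) → List (Int × Int))
    (i : Int) (cs : List (Int × Int)) : List (Int × Int) :=
  let st := (PySem.List.pyRange i (n - 1) 1).foldl (aStep get put) (cs, 1)
  if st.2 ≥ 3 then
    (PySem.List.pyRange 0 st.2 1).foldl (fun cs k => put (n - 1 - k) cs) st.1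
  else st.1

-- B's emission pass, rephrased with the recursive run length in place of the table lookup
def crushLine2 (n : Int) (get : Int → Int) (put : Int → List (Int × Int) → List (Int × Int))
    (i : Int) (cs : List (Int × Int)) : List (Int × Int) :=
  if h : i < n then
    crushLine2 n get put (i + runN n get i)
      (if get i ≠ 0 ∧ runN n get i ≥ 3 then
        (PySem.List.pyRange (i + runN n get i - 1) (i - 1) (-1)).foldl (fun cs m => put m cs) cs
       else cs)
  else cs
termination_by (n - i).toNat
decreasing_by have := runN_pos n get i; omega

theorem crushLine2_go (n : Int) (get : Int → Int) (put : Int → List (Int × Int) → List (Int × Int))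
    (i : Int) (cs : List (Int × Int)) (h : i < n) :
    crushLine2 n get put i cs =
      crushLine2 n get put (i + runN n get i)
        (if get i ≠ 0 ∧ runN n get i ≥ 3 then
          (PySem.List.pyRange (i + runN n get i - 1) (i - 1) (-1)).foldl (fun cs m => put m cs) cs
         else cs) := by
  rw [crushLine2, dif_pos h]

theorem crushLine2_stop (n : Int) (get : Int → Int) (put : Int → List (Int × Int) → List (Int × Int))
    (i : Int) (cs : List (Int × Int)) (h : ¬ i < n) :
    crushLine2 n get put i cs = cs := by
  rw [crushLine2, dif_neg h]

-- A's flush (count iterations, positions e, e-1, …) equals B's countdown emission range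
theorem flush_eq (put : Int → List (Int × Int) → List (Int × Int)) (e cnt : Int) (cs : List (Int × Int)) :
    (PySem.List.pyRange 0 cnt 1).foldl (fun cs k => put (e - k) cs) cs
      = (PySem.List.pyRange e (e - cnt) (-1)).foldl (fun cs k => put k cs) cs := by
  rw [PySem.List.pyRange_one, PySem.List.pyRange_neg_one, List.foldl_map, List.foldl_map]
  simp only [zero_add, sub_zero, sub_sub_cancel]

-- the counter phase of A along a nonzero run: count merely accumulates until the run's last cell
theorem run_phase (n : Int) (get : Int → Int) (put : Int → List (Int × Int) → List (Int × Int))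
    (i j : Int) (cs : List (Int × Int)) (hj : j ≤ n - 1)
    (hval : ∀ k, i ≤ k → k ≤ j → get k = get i) (hz : get i ≠ 0)
    (c : Int) (hc1 : i ≤ c) (hc2 : c ≤ j) :
    (PySem.List.pyRange c (n - 1) 1).foldl (aStep get put) (cs, c - i + 1)
      = (PySem.List.pyRange j (n - 1) 1).foldl (aStep get put) (cs, j - i + 1) := by
  rcases eq_or_lt_of_le hc2 with he | hl
  · rw [he]
  · rw [PySem.List.pyRange_one_cons (by omega : c < n - 1), List.foldl_cons]
    have hstep : aStep get put (cs, c - i + 1) c = (cs, (c + 1) - i + 1) := by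
      unfold aStep
      have h1 : get c = get (c + 1) := by
        rw [hval c hc1 hc2, hval (c + 1) (by omega) (by omega)]
      have h2 : get c ≠ 0 := by rw [hval c hc1 hc2]; exact hz
      rw [if_pos ⟨h1, h2⟩]
      refine Prod.ext rfl ?_
      show c - i + 1 + 1 = (c + 1) - i + 1
      ring
    rw [hstep]
    exact run_phase n get put i j cs hj hval hz (c + 1) (by omega) hl
termination_by (j - c).toNat
decreasing_by omega

-- A's per-line scan equals B's run-jumping emission (with the recursive run length)
theorem line_eq (n : Int) (get : Int → Int) (put : Int → List (Int × Int) → List (Int × Int))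
    (i : Int) (cs : List (Int × Int)) :
    aLine n get put i cs = crushLine2 n get put i cs := by
  by_cases hin : i < n
  · have hk1 := runN_pos n get i
    have hkn := runN_le n get i hin
    by_cases hz : get i = 0
    · -- zero cell: run length 1, nothing emitted on either side
      have hk : runN n get i = 1 := by
        rw [runN, dif_neg (by tauto)]
      have hstep : aLine n get put i cs = aLine n get put (i + 1) cs := by
        rcases lt_or_ge i (n - 1) with hlt | hge
        · unfold aLine
          rw [PySem.List.pyRange_one_cons hlt, List.foldl_cons]
          have ha : aStep get put (cs, 1) i = (cs, 1) := by
            unfold aStep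
            rw [if_neg (by tauto), if_neg (by norm_num)]
          rw [ha]
        · unfold aLine
          rw [PySem.List.pyRange_one_eq_nil (by omega), PySem.List.pyRange_one_eq_nil (by omega)]
      rw [hstep, line_eq n get put (i + 1) cs,
          crushLine2_go n get put i cs hin, hk, if_neg (by tauto)]
    · -- nonzero maximal run of length k = runN: A's count reaches k and flushes exactly B's range
      set k := runN n get i with hkdef
      have hval : ∀ m, i ≤ m → m ≤ i + k - 1 → get m = get i := runN_val n get i
      have hrun := run_phase n get put i (i + k - 1) cs (by omega) hval hz i le_rfl (by omega)
      have hone : i - i + 1 = (1 : Int) := by ring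
      have htwo : (i + k - 1) - i + 1 = k := by ring
      rw [hone, htwo] at hrun
      have hflushes : ∀ ds : List (Int × Int),
          (if k ≥ 3 then
             (PySem.List.pyRange 0 k 1).foldl (fun cs m => put (i + k - 1 - m) cs) ds
           else ds)
            = (if get i ≠ 0 ∧ k ≥ 3 then
                 (PySem.List.pyRange (i + k - 1) (i - 1) (-1)).foldl (fun cs m => put m cs) ds
               else ds) := by
        intro ds
        rw [flush_eq put (i + k - 1) k ds]
        have he : (i + k - 1) - k = i - 1 := by ring
        rw [he]
        by_cases hc : k ≥ 3
        · rw [if_pos hc, if_pos ⟨hz, hc⟩]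
        · rw [if_neg hc, if_neg (by tauto)]
      rcases eq_or_lt_of_le (by omega : i + k - 1 ≤ n - 1) with hje | hjl
      · -- the run reaches the end of the line: A's end-of-line flush fires
        unfold aLine
        rw [hrun, hje, PySem.List.pyRange_one_eq_nil (by omega), List.foldl_nil]
        rw [crushLine2_go n get put i cs hin, ← hkdef,
            crushLine2_stop n get put (i + k) _ (by omega)]
        rw [← hje]
        exact hflushes cs
      · -- the run ends inside the line: A flushes at the mismatch pair (i+k-1, i+k)
        have hstep : aStep get put (cs, k) (i + k - 1)
            = ((if k ≥ 3 then
                  (PySem.List.pyRange 0 k 1).foldl (fun cs m => put (i + k - 1 - m) cs) cs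
                else cs), 1) := by
          unfold aStep
          have hne : ¬ (get (i + k - 1) = get (i + k - 1 + 1) ∧ get (i + k - 1) ≠ 0) := by
            have hm := runN_max n get i (by omega)
            rw [← hkdef] at hm
            have hji : get (i + k - 1) = get i := hval _ (by omega) le_rfl
            have hsucc : i + k - 1 + 1 = i + k := by ring
            rintro ⟨ha, -⟩
            exact hm ⟨by rw [← hsucc, ← ha, hji], by rw [← hji]; exact (by rw [hji]; exact hz)⟩
          rw [if_neg hne]
        unfold aLine
        rw [hrun, PySem.List.pyRange_one_cons (by omega : i + k - 1 < n - 1), List.foldl_cons, hstep]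
        have hrest := line_eq n get put (i + k)
          (if k ≥ 3 then
             (PySem.List.pyRange 0 k 1).foldl (fun cs m => put (i + k - 1 - m) cs) cs
           else cs)
        unfold aLine at hrest
        have hsucc : i + k - 1 + 1 = i + k := by ring
        rw [hsucc, hrest]
        rw [crushLine2_go n get put i cs hin, ← hkdef, hflushes cs]
  · unfold aLine
    rw [PySem.List.pyRange_one_eq_nil (by omega), List.foldl_nil,
        crushLine2_stop n get put i cs hin, if_neg (by norm_num)]
termination_by (n - i).toNat
decreasing_by all_goals omega

-- characterisation of Source B's table: the fold that builds `run` yields exactly the runN values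
theorem runLens_fold (get : Int → Int) (n : Int) (len : Nat) (hlen : (len : Int) ≤ n) :
    ((List.range len).map (fun m : Nat => n - 1 - (m : Int))).foldl
      (fun (st : List Int × Int) i =>
        let cur := if i + 1 < n ∧ get i = get (i + 1) ∧ get i ≠ 0 then st.2 + 1 else 1
        (cur :: st.1, cur))
      ([], 0)
    = ((List.range len).map (fun m : Nat => runN n get (n - len + (m : Int))),
       if len = 0 then 0 else runN n get (n - (len : Int))) := by
  induction len with
  | zero => simp
  | succ len ih =>
    have ih' := ih (by push_cast at hlen ⊢; omega)
    have hsplit : List.map (fun m : Nat => n - 1 - (m : Int)) (List.range (len + 1))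
        = List.map (fun m : Nat => n - 1 - (m : Int)) (List.range len) ++ [n - 1 - (len : Int)] := by
      rw [List.range_succ, List.map_append]
      rfl
    rw [hsplit, List.foldl_append, ih']
    dsimp only [List.map_cons, List.map_nil, List.foldl_cons, List.foldl_nil]
    have hi0 : n - 1 - (len : Int) + 1 = n - (len : Int) := by ring
    have hcur : (if n - 1 - (len : Int) + 1 < n ∧ get (n - 1 - (len : Int)) = get (n - 1 - (len : Int) + 1)
                    ∧ get (n - 1 - (len : Int)) ≠ 0
                 then (if len = 0 then 0 else runN n get (n - (len : Int))) + 1 else 1)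
        = runN n get (n - 1 - (len : Int)) := by
      conv_rhs => rw [runN]
      by_cases hC : n - 1 - (len : Int) + 1 < n ∧ get (n - 1 - (len : Int)) = get (n - 1 - (len : Int) + 1)
          ∧ get (n - 1 - (len : Int)) ≠ 0
      · have hlen0 : ¬ len = 0 := by
          rcases hC with ⟨h1, -⟩
          intro h0
          rw [h0] at h1
          push_cast at h1
          omega
        rw [dif_pos hC, if_pos hC, if_neg hlen0, hi0]
      · rw [dif_neg hC, if_neg hC]
    rw [hcur]
    refine Prod.ext ?_ ?_
    · show runN n get (n - 1 - (len : Int)) :: _ = _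
      rw [List.range_succ_eq_map, List.map_cons, List.map_map]
      refine List.cons_eq_cons.mpr ⟨by congr 1; push_cast; ring, ?_⟩
      refine List.map_congr_left ?_
      intro m hm
      simp only [Function.comp, Nat.succ_eq_add_one]
      congr 1
      push_cast
      ring
    · show runN n get (n - 1 - (len : Int)) = _
      rw [if_neg (by omega)]
      congr 1
      push_cast
      ring

-- the table lookup Source B's while loop performs is the recursive run length
theorem runLens_getD (get : Int → Int) (n : Int) (i : Int) (h0 : 0 ≤ i) (hi : i < n) :
    PySem.List.pyGetD (runLens get n) i 1 = runN n get i := by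
  unfold runLens
  rw [PySem.List.pyRange_neg_one]
  have e : (n - 1 - -1).toNat = n.toNat := by omega
  rw [e, runLens_fold get n n.toNat (by omega)]
  rw [PySem.List.pyGetD_of_nonneg _ _ h0]
  rw [PySem.List.getD_map_range _ _ _ _ (by omega)]
  congr 1
  omega

-- one unfold step of Source B's while loop
theorem emit_succ (run : List Int) (n : Int) (i : Int) (fuel : Nat) (h : i < n) :
    emit run n i (fuel + 1)
      = (if PySem.List.pyGetD run i 1 ≥ 3 then
           PySem.List.pyRange (i + PySem.List.pyGetD run i 1 - 1) (i - 1) (-1)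
         else []) ++ emit run n (i + PySem.List.pyGetD run i 1) fuel := by
  rw [emit, if_pos h]

-- B's emission pass over the table equals the run-jumping recursion
theorem emit_crush (n : Int) (get : Int → Int) (put : Int → List (Int × Int) → List (Int × Int)) :
    ∀ (fuel : Nat) (i : Int) (cs : List (Int × Int)), 0 ≤ i → (n - i).toNat ≤ fuel →
      (emit (runLens get n) n i fuel).foldl (fun cs m => put m cs) cs = crushLine2 n get put i cs := by
  intro fuel
  induction fuel with
  | zero =>
    intro i cs h0 hf
    rw [crushLine2_stop n get put i cs (by omega)]
    rfl
  | succ fuel ih =>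
    intro i cs h0 hf
    by_cases hin : i < n
    · rw [emit_succ _ _ _ _ hin, List.foldl_append, runLens_getD get n i h0 hin]
      have hpos := runN_pos n get i
      rw [crushLine2_go n get put i cs hin]
      by_cases h3 : runN n get i ≥ 3
      · rw [if_pos h3, if_pos ⟨runN_nonzero n get i (by omega), h3⟩]
        exact ih (i + runN n get i) _ (by omega) (by omega)
      · rw [if_neg h3, if_neg (fun hh => h3 hh.2)]
        rw [List.foldl_nil]
        exact ih (i + runN n get i) _ (by omega) (by omega)
    · rw [crushLine2_stop n get put i cs hin, emit, if_neg hin]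
      rfl

-- Source B's crushable, folded into the set, equals A's per-line scan
theorem lineB_eq (n : Int) (get : Int → Int) (put : Int → List (Int × Int) → List (Int × Int))
    (cs : List (Int × Int)) :
    (crushable get n).foldl (fun cs m => put m cs) cs = aLine n get put 0 cs := by
  rw [line_eq n get put 0 cs]
  exact emit_crush n get put n.toNat 0 cs le_rfl (by omega)

-- ===== VERDICT (by name: the statement is the Claim_ definition above) =====
theorem setToZero_spec : Claim_equal_setToZero := by
  intro board row col _ _
  show setToZero board row col = setToZero_alt board row col
  have e1 : (fun (cs : List (Int × Int)) (r : Int) =>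
        aLine col (fun c => bget board r c) (fun k cs => PySem.Set.add cs (r, k)) 0 cs)
      = (fun (cs : List (Int × Int)) (r : Int) =>
        (crushable (fun c => bget board r c) col).foldl (fun cs c => PySem.Set.add cs (r, c)) cs) :=
    funext fun cs => funext fun r => (lineB_eq _ _ _ cs).symm
  have e2 : (fun (cs : List (Int × Int)) (c : Int) =>
        aLine row (fun t => bget board t c) (fun k cs => PySem.Set.add cs (k, c)) 0 cs)
      = (fun (cs : List (Int × Int)) (c : Int) =>
        (crushable (fun t => bget board t c) row).foldl (fun cs t => PySem.Set.add cs (t, c)) cs) :=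
    funext fun cs => funext fun c => (lineB_eq _ _ _ cs).symm
  show (PySem.List.pyRange 0 col 1).foldl
      (fun (cs : List (Int × Int)) (c : Int) =>
        aLine row (fun t => bget board t c) (fun k cs => PySem.Set.add cs (k, c)) 0 cs)
      ((PySem.List.pyRange 0 row 1).foldl
        (fun (cs : List (Int × Int)) (r : Int) =>
          aLine col (fun c => bget board r c) (fun k cs => PySem.Set.add cs (r, k)) 0 cs)
        PySem.Set.empty)
    = setToZero_alt board row col
  rw [e1, e2]
  rfl
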